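-- pv_equiv track=rewrite | github.com/gyang274/leetcode | src/1400-1499/1487.make.file.names.unique.py | getFolderNames
-- ===== SOURCE A (Python) =====
-- from typing import List
--
-- def getFolderNames(names: List[str]) -> List[str]:
--   d, ans = {}, []
--   for x in names:
--     if x in d:
--       i = d[x]
--       while f"{x}({i})" in d:
--         i += 1
--       d[x] = i + 1
--       d[f"{x}({i})"] = 1
--       ans.append(f"{x}({i})")
--     else:
--       d[x] = 1
--       ans.append(x)
--   return ans
-- ===== SOURCE B (Python) =====
-- from typing import List
--
-- def getFolderNames(names: List[str]) -> List[str]: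
--     # One insertion-ordered set of emitted names (a dict used as an ordered set);
--     # every emitted name is new, so the answer is exactly this set in order.
--     # On a collision, rescan suffixes from 1; a bounded range suffices because at
--     # most len(used) candidates can be taken.
--     used = dict()
--     for x in names:
--         if x in used:
--             x = next(f"{x}({i})" for i in range(1, len(used) + 2)
--                      if f"{x}({i})" not in used)
--         used[x] = None
--     return list(used)
-- ===== Notes on version B (the rewrite author's own statement) =====
-- stated objective: simpler
-- what changed: B drops A's dict of per-base resume counters and the separate answer list: it keeps one insertion-ordered set of emitted names (the answer IS that set in order) and on a collision rescans suffixes from 1 with a bounded-range generator; since names are never removed, the first free suffix from 1 equals A's cached resume point.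
import Mathlib
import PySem

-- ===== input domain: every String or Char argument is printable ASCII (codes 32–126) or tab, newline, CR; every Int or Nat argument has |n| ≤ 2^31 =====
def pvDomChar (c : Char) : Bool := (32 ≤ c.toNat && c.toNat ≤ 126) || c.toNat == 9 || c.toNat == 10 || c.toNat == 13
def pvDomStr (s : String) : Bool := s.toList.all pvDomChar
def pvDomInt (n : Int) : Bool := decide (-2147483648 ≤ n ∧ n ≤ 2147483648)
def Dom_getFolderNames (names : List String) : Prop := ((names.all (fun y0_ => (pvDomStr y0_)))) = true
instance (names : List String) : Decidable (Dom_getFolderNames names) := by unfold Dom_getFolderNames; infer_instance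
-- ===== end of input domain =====

-- B drops A's dict of per-base resume counters and the separate answer list: it keeps one
-- insertion-ordered set of emitted names (the answer IS that set in order) and rescans
-- suffixes from 1 on a collision, via a bounded-range generator (objective: simpler).

-- ===== PORT A =====

-- f"{x}({i})"
def pvMkName (x : String) (i : Int) : String := x ++ "(" ++ PySem.Int.toStr i ++ ")"

-- the 'while f"{x}({i})" in d: i += 1' loop; the fuel only makes it total
-- (proved sufficient below: d.size + 1 candidates cannot all be keys of d)
def pvScanA (d : PySem.Dict String Int) (x : String) : Int → Nat → Int
  | i, 0 => i
  | i, fuel+1 => if d.contains (pvMkName x i) then pvScanA d x (i+1) fuel else i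

-- one iteration of A's for-loop over (d, ans)
def pvStepA (st : PySem.Dict String Int × List String) (x : String) :
    PySem.Dict String Int × List String :=
  let d := st.1
  let ans := st.2
  if d.contains x then
    let i := pvScanA d x (d.getD x 0) (d.size + 1)
    (((d.insert x (i+1)).insert (pvMkName x i) 1), ans ++ [pvMkName x i])
  else (d.insert x 1, ans ++ [x])

def getFolderNames (names : List String) : List String :=
  (names.foldl pvStepA ((PySem.Dict.empty : PySem.Dict String Int), ([] : List String))).2

-- ===== PORT B =====

-- next(f"{x}({i})" for i in range(1, len(used) + 2) if f"{x}({i})" not in used);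
-- the 'none' default stands for Python's StopIteration and is proved unreachable below
-- (at most len(used) of the len(used) + 1 candidates can be taken)
def pvNextFree (used : PySem.Set String) (x : String) : String :=
  match (PySem.List.pyRange 1 ((used.length : Int) + 2) 1).find?
      (fun i => !decide (pvMkName x i ∈ used)) with
  | some i => pvMkName x i
  | none => x

-- one iteration of B's for-loop: dict-as-ordered-set insertion 'used[x] = None'
def pvStepB (used : PySem.Set String) (x : String) : PySem.Set String :=
  PySem.Set.add used (if x ∈ used then pvNextFree used x else x)

-- 'return list(used)': the accumulated ordered set IS the answer
def getFolderNames_alt (names : List String) : List String :=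
  names.foldl pvStepB (PySem.Set.empty : PySem.Set String)

-- ===== PRECONDITION & SPEC =====
def Spec_getFolderNames (names : List String) (out : List String) : Prop := out = getFolderNames_alt names
instance (names : List String) (out : List String) : Decidable (Spec_getFolderNames names out) := by unfold Spec_getFolderNames; infer_instance

-- ===== CLAIM (what is proved, stated in full; the proofs are below) =====
def Claim_equal_getFolderNames : Prop := ∀ (names : List String), Dom_getFolderNames names → Spec_getFolderNames names (getFolderNames names)

-- ===== LEMMAS AND PROOFS =====

-- `Nat.toDigits 10` is injective (hence pvMkName x · is injective on nonnegative i)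

theorem pv_toDigitsCore_eq_digits (b : Nat) (hb : 2 ≤ b) :
    ∀ (f n : Nat) (l : List Char), 0 < n → n ≤ f →
      Nat.toDigitsCore b f n l = ((Nat.digits b n).map Nat.digitChar).reverse ++ l := by
  intro f
  induction f with
  | zero => intro n l hn hf; omega
  | succ f ih =>
    intro n l hn _hf
    rw [Nat.toDigitsCore]
    rw [Nat.digits_def' (by omega : 1 < b) hn]
    by_cases h : n / b = 0
    · simp [h, Nat.digits_zero, List.reverse_cons]
    · rw [if_neg h]
      rw [ih (n / b) (Nat.digitChar (n % b) :: l) (Nat.pos_of_ne_zero h)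
        (by
          have h1 : n / b < n := Nat.div_lt_self hn (by omega)
          omega)]
      simp [List.reverse_cons, List.append_assoc]

theorem pv_toDigits_eq_digits (b : Nat) (hb : 2 ≤ b) (n : Nat) (hn : 0 < n) :
    Nat.toDigits b n = ((Nat.digits b n).map Nat.digitChar).reverse := by
  rw [Nat.toDigits, pv_toDigitsCore_eq_digits b hb (n+1) n [] hn (by omega), List.append_nil]

theorem pv_digitChar_inj : ∀ a < 10, ∀ c < 10, Nat.digitChar a = Nat.digitChar c → a = c := by decide

theorem pv_map_digitChar_inj :
    ∀ (l₁ l₂ : List Nat), (∀ a ∈ l₁, a < 10) → (∀ a ∈ l₂, a < 10) →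
      l₁.map Nat.digitChar = l₂.map Nat.digitChar → l₁ = l₂ := by
  intro l₁
  induction l₁ with
  | nil => intro l₂ _ _ h; cases l₂ <;> simp_all
  | cons a t ih =>
    intro l₂ h1 h2 h
    cases l₂ with
    | nil => simp_all
    | cons c t' =>
      simp only [List.map_cons, List.cons.injEq] at h
      have := pv_digitChar_inj a (h1 a (by simp)) c (h2 c (by simp)) h.1
      have := ih t' (fun x hx => h1 x (by simp [hx])) (fun x hx => h2 x (by simp [hx])) h.2
      simp_all

theorem pv_toDigits_inj (m n : Nat) (h : Nat.toDigits 10 m = Nat.toDigits 10 n) : m = n := by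
  rcases Nat.eq_zero_or_pos m with hm | hm <;> rcases Nat.eq_zero_or_pos n with hn | hn
  · omega
  · exfalso
    rw [hm, pv_toDigits_eq_digits 10 (by omega) n hn] at h
    have h0 : Nat.toDigits 10 0 = ['0'] := by decide
    rw [h0] at h
    have h1 : (Nat.digits 10 n).map Nat.digitChar = ['0'] := by
      have := congrArg List.reverse h
      simpa using this.symm
    have h2 : Nat.digits 10 n = [0] := by
      apply pv_map_digitChar_inj _ [0]
      · intro a ha; exact Nat.digits_lt_base (by omega) ha
      · intro a ha; simp at ha; omega
      · simpa using h1
    have h3 := Nat.getLast_digit_ne_zero 10 (by omega : n ≠ 0)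
    simp [h2] at h3
  · exfalso
    rw [hn, pv_toDigits_eq_digits 10 (by omega) m hm] at h
    have h0 : Nat.toDigits 10 0 = ['0'] := by decide
    rw [h0] at h
    have h1 : (Nat.digits 10 m).map Nat.digitChar = ['0'] := by
      have := congrArg List.reverse h
      simpa using this
    have h2 : Nat.digits 10 m = [0] := by
      apply pv_map_digitChar_inj _ [0]
      · intro a ha; exact Nat.digits_lt_base (by omega) ha
      · intro a ha; simp at ha; omega
      · simpa using h1
    have h3 := Nat.getLast_digit_ne_zero 10 (by omega : m ≠ 0)
    simp [h2] at h3
  · rw [pv_toDigits_eq_digits 10 (by omega) m hm, pv_toDigits_eq_digits 10 (by omega) n hn] at h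
    have h1 : (Nat.digits 10 m).map Nat.digitChar = (Nat.digits 10 n).map Nat.digitChar := by
      have := congrArg List.reverse h
      simpa using this
    have h2 : Nat.digits 10 m = Nat.digits 10 n :=
      pv_map_digitChar_inj _ _ (fun a ha => Nat.digits_lt_base (by omega) ha)
        (fun a ha => Nat.digits_lt_base (by omega) ha) h1
    calc m = Nat.ofDigits 10 (Nat.digits 10 m) := (Nat.ofDigits_digits 10 m).symm
    _ = Nat.ofDigits 10 (Nat.digits 10 n) := by rw [h2]
    _ = n := Nat.ofDigits_digits 10 n

theorem pvMkName_inj (x : String) (i j : Int) (hi : 0 ≤ i) (hj : 0 ≤ j)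
    (h : pvMkName x i = pvMkName x j) : i = j := by
  unfold pvMkName at h
  have h1 := congrArg String.toList h
  simp only [String.toList_append] at h1
  simp only [List.append_assoc] at h1
  have h2 := List.append_cancel_left (List.append_cancel_left h1)
  have h3 : (PySem.Int.toStr i).toList = (PySem.Int.toStr j).toList :=
    List.append_cancel_right h2
  rw [PySem.Int.toList_toStr, PySem.Int.toList_toStr] at h3
  unfold PySem.Int.toChars at h3
  rw [if_neg (by omega), if_neg (by omega)] at h3
  have := pv_toDigits_inj i.toNat j.toNat h3
  omega

-- 'x is the first free suffix name for base x over taken-set L'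
def pvLeast (L : List String) (x : String) (i : Int) : Prop :=
  1 ≤ i ∧ pvMkName x i ∉ L ∧ ∀ j : Int, 1 ≤ j → j < i → pvMkName x j ∈ L

theorem pvLeast_unique (L : List String) (x : String) (i₁ i₂ : Int)
    (h₁ : pvLeast L x i₁) (h₂ : pvLeast L x i₂) : i₁ = i₂ := by
  obtain ⟨ha₁, hf₁, ht₁⟩ := h₁
  obtain ⟨ha₂, hf₂, ht₂⟩ := h₂
  rcases lt_trichotomy i₁ i₂ with h | h | h
  · exact absurd (ht₂ i₁ ha₁ h) hf₁
  · exact h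
  · exact absurd (ht₁ i₂ ha₂ h) hf₂

-- among any L.length + 1 consecutive candidates one is free (pvMkName x · is injective)
theorem pv_exists_free (L : List String) (x : String) (i : Int) (hi : 0 ≤ i) :
    ∃ j, i ≤ j ∧ j < i + (L.length + 1 : Nat) ∧ pvMkName x j ∉ L := by
  by_contra hall
  rw [not_exists] at hall
  simp only [not_and, not_not] at hall
  have hnd : ((List.range (L.length + 1)).map (fun k : Nat => pvMkName x (i + (k:Int)))).Nodup := by
    apply List.Nodup.map_on _ (List.nodup_range)
    intro a _ b _ hab
    have := pvMkName_inj x (i + (a:Int)) (i + (b:Int)) (by omega) (by omega) hab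
    omega
  have hsub : ((List.range (L.length + 1)).map (fun k : Nat => pvMkName x (i + (k:Int)))) ⊆ L := by
    intro y hy
    simp only [List.mem_map, List.mem_range] at hy
    obtain ⟨k, hk, rfl⟩ := hy
    exact hall (i + (k:Int)) (by omega) (by push_cast; omega)
  have := (hnd.subperm hsub).length_le
  simp at this

-- A's scan characterised (stated over an arbitrary taken-list L via d.keys)

theorem pvScanA_ge (d : PySem.Dict String Int) (x : String) :
    ∀ (fuel : Nat) (i : Int), i ≤ pvScanA d x i fuel := by
  intro fuel
  induction fuel with
  | zero => intro i; simp [pvScanA]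
  | succ f ih =>
    intro i
    rw [pvScanA]
    split
    · have := ih (i+1); omega
    · omega

theorem pvScanA_taken (d : PySem.Dict String Int) (x : String) :
    ∀ (fuel : Nat) (i : Int), ∀ j, i ≤ j → j < pvScanA d x i fuel → pvMkName x j ∈ d.keys := by
  intro fuel
  induction fuel with
  | zero => intro i j h1 h2; simp [pvScanA] at h2; omega
  | succ f ih =>
    intro i j h1 h2
    rw [pvScanA] at h2
    by_cases hc : d.contains (pvMkName x i)
    · rw [if_pos hc] at h2
      rcases eq_or_lt_of_le h1 with rfl | h1'
      · rw [PySem.Dict.contains_eq_decide_mem_keys] at hc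
        simpa using hc
      · exact ih (i+1) j (by omega) h2
    · rw [if_neg hc] at h2; omega

theorem pvScanA_free (d : PySem.Dict String Int) (x : String) :
    ∀ (fuel : Nat) (i : Int), (∃ j, i ≤ j ∧ j < i + fuel ∧ pvMkName x j ∉ d.keys) →
      pvMkName x (pvScanA d x i fuel) ∉ d.keys := by
  intro fuel
  induction fuel with
  | zero => intro i ⟨j, h1, h2, _⟩; omega
  | succ f ih =>
    intro i ⟨j, h1, h2, h3⟩
    rw [pvScanA]
    by_cases hc : pvMkName x i ∈ d.keys
    · rw [if_pos (by rw [PySem.Dict.contains_eq_decide_mem_keys]; simpa using hc)]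
      apply ih (i+1)
      refine ⟨j, ?_, by push_cast at h2 ⊢; omega, h3⟩
      rcases eq_or_lt_of_le h1 with rfl | h1'
      · exact absurd hc h3
      · omega
    · rw [if_neg (by rw [PySem.Dict.contains_eq_decide_mem_keys]; simpa using hc)]
      exact hc

-- B's bounded-range search characterised: find? over pyRange returns the least hit

theorem pv_find?_pyRange_aux (p : Int → Bool) :
    ∀ (n : Nat) (a i : Int), (PySem.List.pyRange a (a + (n:Int)) 1).find? p = some i →
      a ≤ i ∧ p i = true ∧ ∀ j, a ≤ j → j < i → p j = false := by
  intro n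
  induction n with
  | zero =>
    intro a i h
    rw [PySem.List.pyRange_one_eq_nil (by omega)] at h
    simp at h
  | succ m ih =>
    intro a i h
    rw [PySem.List.pyRange_one_cons (by push_cast; omega)] at h
    rw [List.find?_cons] at h
    by_cases hpa : p a = true
    · rw [hpa] at h
      simp only [Option.some.injEq] at h
      subst h
      exact ⟨le_refl _, hpa, fun j h1 h2 => by omega⟩
    · rw [Bool.not_eq_true] at hpa
      rw [hpa] at h
      have harg : a + ((m:Int) + 1) = (a + 1) + (m:Int) := by ring
      rw [show ((m+1 : Nat):Int) = (m:Int) + 1 by push_cast; ring, harg] at h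
      obtain ⟨h1, h2, h3⟩ := ih (a+1) i h
      refine ⟨by omega, h2, ?_⟩
      intro j hj1 hj2
      rcases eq_or_lt_of_le hj1 with rfl | hj1'
      · exact hpa
      · exact h3 j (by omega) hj2

theorem pvNextFree_least (used : PySem.Set String) (x : String) :
    ∃ i, (PySem.List.pyRange 1 ((used.length : Int) + 2) 1).find?
        (fun i => !decide (pvMkName x i ∈ used)) = some i ∧ pvLeast used x i := by
  have hsome : ((PySem.List.pyRange 1 ((used.length : Int) + 2) 1).find?
      (fun i => !decide (pvMkName x i ∈ used))).isSome := by
    rw [List.isSome_find?, List.any_eq_true]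
    obtain ⟨j, h1, h2, h3⟩ := pv_exists_free used x 1 (by omega)
    refine ⟨j, ?_, by simpa using h3⟩
    rw [PySem.List.mem_pyRange_one]
    refine ⟨h1, by push_cast at h2 ⊢; omega⟩
  obtain ⟨i, hi⟩ := Option.isSome_iff_exists.mp hsome
  refine ⟨i, hi, ?_⟩
  have hb : (1 : Int) + ((used.length + 1 : Nat) : Int) = (used.length : Int) + 2 := by
    push_cast; ring
  rw [← hb] at hi
  obtain ⟨h1, h2, h3⟩ := pv_find?_pyRange_aux _ (used.length + 1) 1 i hi
  exact ⟨h1, by simpa using h2, fun j hj1 hj2 => by simpa using h3 j hj1 hj2⟩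

theorem pvNextFree_eq (used : PySem.Set String) (x : String) (i : Int)
    (h : pvLeast used x i) : pvNextFree used x = pvMkName x i := by
  obtain ⟨i', hi', hL⟩ := pvNextFree_least used x
  unfold pvNextFree
  rw [hi', pvLeast_unique used x i' i hL h]

-- the invariant tying A's dict to B's ordered set
def pvInv (d : PySem.Dict String Int) (used : List String) : Prop :=
  d.keys = used ∧
  ∀ x c, d.get? x = some c →
    1 ≤ c ∧ ∀ j : Int, 1 ≤ j → j < c → pvMkName x j ∈ d.keys

theorem pvStep_agree (d : PySem.Dict String Int) (used : List String) (x : String)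
    (h : pvInv d used) :
    (pvStepA (d, used) x).2 = pvStepB used x ∧ pvInv (pvStepA (d, used) x).1 (pvStepB used x) := by
  obtain ⟨hkeys, hcnt⟩ := h
  by_cases hmem : x ∈ used
  · -- collision branch
    have hcontains : d.contains x = true := by
      rw [PySem.Dict.contains_eq_decide_mem_keys]; simp [hkeys, hmem]
    obtain ⟨c, hc⟩ : ∃ c, d.get? x = some c := by
      rw [PySem.Dict.contains_eq_isSome_get?] at hcontains
      exact Option.isSome_iff_exists.mp hcontains
    have hgetD : d.getD x 0 = c := by rw [PySem.Dict.getD_eq_get?_getD, hc]; rfl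
    obtain ⟨hc1, hbelow⟩ := hcnt x c hc
    have hsize : d.size = used.length := by
      rw [PySem.Dict.size, ← hkeys]; simp [PySem.Dict.keys]
    set iA := pvScanA d x (d.getD x 0) (d.size + 1) with hiA
    have hgeA : c ≤ iA := by rw [hiA, hgetD]; exact pvScanA_ge d x (d.size + 1) c
    have hkl : d.keys.length = used.length := by rw [hkeys]
    have hleastA : pvLeast used x iA := by
      refine ⟨by omega, ?_, ?_⟩
      · rw [← hkeys, hiA, hgetD]
        apply pvScanA_free d x (d.size + 1) c
        obtain ⟨j, h1, h2, h3⟩ := pv_exists_free d.keys x c (by omega)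
        refine ⟨j, h1, ?_, h3⟩
        have hsz : d.size = d.keys.length := by rw [hsize, hkl]
        push_cast at h2 ⊢
        omega
      · intro j hj1 hj2
        rw [← hkeys]
        by_cases hjc : j < c
        · exact hbelow j hj1 hjc
        · rw [hiA, hgetD] at hj2
          exact pvScanA_taken d x (d.size + 1) c j (by omega) hj2
    have hpick : pvNextFree used x = pvMkName x iA := pvNextFree_eq used x iA hleastA
    have hfree : pvMkName x iA ∉ used := hleastA.2.1
    have hstepA : pvStepA (d, used) x =
        (((d.insert x (iA+1)).insert (pvMkName x iA) 1), used ++ [pvMkName x iA]) := by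
      rw [pvStepA]; simp only [hcontains, if_pos, ← hiA]
    have hstepB : pvStepB used x = used ++ [pvMkName x iA] := by
      rw [pvStepB, if_pos hmem, hpick, PySem.Set.add, if_neg (by simpa using hfree)]
    rw [hstepA, hstepB]
    refine ⟨rfl, ?_, ?_⟩
    · -- keys equal
      have h1 : (d.insert x (iA+1)).keys = d.keys :=
        PySem.Dict.keys_insert_of_contains d _ hcontains
      have h2 : ((d.insert x (iA+1)).insert (pvMkName x iA) 1).keys =
          (d.insert x (iA+1)).keys ++ [pvMkName x iA] := by
        apply PySem.Dict.keys_insert_of_not_contains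
        rw [PySem.Dict.contains_eq_decide_mem_keys, h1, hkeys]
        simp [hfree]
      rw [h2, h1, hkeys]
    · -- counter invariant
      intro y cy hy
      have hkeys' : ((d.insert x (iA+1)).insert (pvMkName x iA) 1).keys =
          d.keys ++ [pvMkName x iA] := by
        rw [PySem.Dict.keys_insert_of_not_contains _ _
            (by rw [PySem.Dict.contains_eq_decide_mem_keys,
                PySem.Dict.keys_insert_of_contains d _ hcontains, hkeys]; simp [hfree]),
          PySem.Dict.keys_insert_of_contains d _ hcontains]
      rw [PySem.Dict.get?_insert, PySem.Dict.get?_insert] at hy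
      by_cases h1 : y = pvMkName x iA
      · rw [if_pos h1] at hy
        have hcy1 : (1:Int) = cy := by injection hy
        exact ⟨by omega, fun j hj1 hj2 => by omega⟩
      · rw [if_neg h1] at hy
        by_cases h2 : y = x
        · rw [if_pos h2] at hy
          have hcy : cy = iA + 1 := by injection hy with hh; omega
          subst h2
          refine ⟨by omega, ?_⟩
          intro j hj1 hj2
          rw [hkeys', List.mem_append]
          by_cases hj4 : j = iA
          · subst hj4; simp
          · exact Or.inl (by rw [hkeys]; exact hleastA.2.2 j hj1 (by omega))
        · rw [if_neg h2] at hy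
          obtain ⟨ha, hb⟩ := hcnt y cy hy
          exact ⟨ha, fun j h1' h2' => by
            rw [hkeys', List.mem_append]; exact Or.inl (hb j h1' h2')⟩
  · -- fresh-name branch
    have hcontains : d.contains x = false := by
      rw [PySem.Dict.contains_eq_decide_mem_keys]; simp [hkeys, hmem]
    have hstepA : pvStepA (d, used) x = (d.insert x 1, used ++ [x]) := by
      rw [pvStepA]; simp [hcontains]
    have hstepB : pvStepB used x = used ++ [x] := by
      rw [pvStepB, if_neg hmem, PySem.Set.add, if_neg (by simpa using hmem)]
    rw [hstepA, hstepB]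
    have hkeys' : (d.insert x 1).keys = d.keys ++ [x] :=
      PySem.Dict.keys_insert_of_not_contains d _ hcontains
    refine ⟨rfl, by rw [hkeys', hkeys], ?_⟩
    intro y cy hy
    rw [PySem.Dict.get?_insert] at hy
    by_cases h1 : y = x
    · rw [if_pos h1] at hy
      have hcy1 : (1:Int) = cy := by injection hy
      exact ⟨by omega, fun j hj1 hj2 => by omega⟩
    · rw [if_neg h1] at hy
      obtain ⟨ha, hb⟩ := hcnt y cy hy
      exact ⟨ha, fun j hj1 hj2 => by
        rw [hkeys', List.mem_append]; exact Or.inl (hb j hj1 hj2)⟩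

-- A's answer list always equals its dict's key list (both start empty and grow identically),
-- and B folds exactly the key list; hence the fold results agree
theorem pvFold_agree :
    ∀ (names : List String) (d : PySem.Dict String Int) (used ans : List String),
      pvInv d used → ans = used →
      (names.foldl pvStepA (d, ans)).2 = names.foldl pvStepB used := by
  intro names
  induction names with
  | nil => intro d used ans _ hans; simpa using hans
  | cons x rest ih =>
    intro d used ans hinv hans
    subst hans
    obtain ⟨heq, hinv'⟩ := pvStep_agree d ans x hinv
    simp only [List.foldl_cons]
    have hA : (pvStepA (d, ans) x) = ((pvStepA (d, ans) x).1, (pvStepA (d, ans) x).2) := rfl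
    rw [hA]
    exact ih _ _ _ hinv' heq

-- ===== VERDICT (by name: the statement is the Claim_ definition above) =====
theorem getFolderNames_spec : Claim_equal_getFolderNames := by
  intro names _
  unfold Spec_getFolderNames getFolderNames getFolderNames_alt
  apply pvFold_agree
  · refine ⟨rfl, ?_⟩
    intro x c hc
    rw [PySem.Dict.get?_empty] at hc
    exact absurd hc (by simp)
  · rfl
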